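-- pv_equiv track=rewrite | github.com/RUBIKOK/OLT-ZTE | services/ont_service.py | _parsear_info_basica_zte
-- ===== SOURCE A (Python) =====
-- def _parsear_info_basica_zte(output: str) -> str:
--     """Parsea la información básica de una ONT ZTE"""
--     lines = output.split('\n')
--     info_lines = []
--     start_found = False
--     history_start = False
--
--     for line in lines:
--         line_stripped = line.strip()
--
--         # Detectar inicio de información
--         if 'ONU interface:' in line_stripped:
--             start_found = True
--
--         # Detectar inicio de tabla de histórico
--         if 'Authpass Time' in line_stripped or 'OfflineTime' in line_stripped:
--             history_start = True
--             break
--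
--         # Recolectar líneas de información básica
--         if start_found and not history_start:
--             if line_stripped and not line_stripped.startswith('--'):
--                 info_lines.append(line_stripped)
--
--     return '\n'.join(info_lines)
-- ===== SOURCE B (Python) =====
-- def _parsear_info_basica_zte(output: str) -> str:
--     """Parsea la información básica de una ONT ZTE (boundary-index version).
--
--     Instead of scanning once with flags, compute the two boundary indices
--     (first line holding a history marker, first line holding the interface
--     marker), slice the stripped lines between them, and filter/join.
--     """
--     stripped = [line.strip() for line in output.split('\n')]
--     n = len(stripped)
--     stop = next((i for i, s in enumerate(stripped)
--                  if 'Authpass Time' in s or 'OfflineTime' in s), n)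
--     start = next((i for i, s in enumerate(stripped)
--                   if 'ONU interface:' in s), n)
--     return '\n'.join(s for s in stripped[start:stop]
--                      if s and not s.startswith('--'))
-- ===== Notes on version B (the rewrite author's own statement) =====
-- stated objective: alternative
-- what changed: Replaces the single flagged loop (start/history booleans plus break) with boundary-index computation: find the index of the first history-marker line and of the first interface-start line, slice the stripped lines between those indices, then filter and join.
import Mathlib
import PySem

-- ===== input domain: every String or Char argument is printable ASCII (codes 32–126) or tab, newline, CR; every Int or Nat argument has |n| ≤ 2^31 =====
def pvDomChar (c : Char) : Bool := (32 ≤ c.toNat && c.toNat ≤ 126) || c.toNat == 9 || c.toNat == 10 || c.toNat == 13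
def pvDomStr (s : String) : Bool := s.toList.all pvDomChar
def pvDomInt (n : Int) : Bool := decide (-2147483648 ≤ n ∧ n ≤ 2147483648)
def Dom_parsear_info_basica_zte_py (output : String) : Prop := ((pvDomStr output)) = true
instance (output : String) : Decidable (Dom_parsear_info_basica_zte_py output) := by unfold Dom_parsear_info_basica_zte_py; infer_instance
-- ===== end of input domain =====

-- B replaces A's flagged single loop with boundary-index computation (first history-marker line, first interface line) plus a slice/filter/join — same cost, alternative decomposition.


-- ===== PORT A =====
-- the for-loop with its two flags and the break; acc = info_lines, started = start_found
def pvLoopA : List String → List String → Bool → List String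
  | [], acc, _ => acc
  | l :: rest, acc, started =>
    let ls := PySem.Str.strip l
    let started := started || PySem.Str.isIn "ONU interface:" ls
    if PySem.Str.isIn "Authpass Time" ls || PySem.Str.isIn "OfflineTime" ls then
      acc  -- history_start = True; break
    else
      let acc := if started && (!(ls == "") && !(PySem.Str.startswith ls "--")) then acc ++ [ls] else acc
      pvLoopA rest acc started

def parsear_info_basica_zte_py (output : String) : String :=
  PySem.Str.join "\n" (pvLoopA ((PySem.Str.split? output "\n").getD []) [] false)

-- ===== PORT B =====
-- next((i for i,s in enumerate(...) if p s), n) → (List.findIdx? p ...).getD n;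
-- stripped[start:stop] with 0 ≤ start, stop (Python slice clamps) → (stripped.take stop).drop start — exact here since both indices are nonnegative.
def parsear_info_basica_zte_py_alt (output : String) : String :=
  let stripped := ((PySem.Str.split? output "\n").getD []).map PySem.Str.strip
  let n := stripped.length
  let stop := (stripped.findIdx? (fun s => PySem.Str.isIn "Authpass Time" s || PySem.Str.isIn "OfflineTime" s)).getD n
  let start := (stripped.findIdx? (fun s => PySem.Str.isIn "ONU interface:" s)).getD n
  PySem.Str.join "\n" (((stripped.take stop).drop start).filter (fun s => !(s == "") && !(PySem.Str.startswith s "--")))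

-- ===== PRECONDITION & SPEC =====
def Spec_parsear_info_basica_zte_py (output : String) (out : String) : Prop := out = parsear_info_basica_zte_py_alt output
instance (output : String) (out : String) : Decidable (Spec_parsear_info_basica_zte_py output out) := by unfold Spec_parsear_info_basica_zte_py; infer_instance

-- ===== CLAIM (what is proved, stated in full; the proofs are below) =====
def Claim_equal_parsear_info_basica_zte_py : Prop := ∀ (output : String), Dom_parsear_info_basica_zte_py output → Spec_parsear_info_basica_zte_py output (parsear_info_basica_zte_py output)

-- ===== LEMMAS AND PROOFS =====
-- the three tests and the filter, named for the proof
def pvHist (s : String) : Bool := PySem.Str.isIn "Authpass Time" s || PySem.Str.isIn "OfflineTime" s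
def pvOnu (s : String) : Bool := PySem.Str.isIn "ONU interface:" s
def pvKeep (s : String) : Bool := !(s == "") && !(PySem.Str.startswith s "--")

def pvStop (ss : List String) : Nat := (ss.findIdx? pvHist).getD ss.length
def pvStart (ss : List String) : Nat := (ss.findIdx? pvOnu).getD ss.length

-- what port A's loop produces on the stripped lines, parameterised by the start flag
def pvTail (ss : List String) (started : Bool) : List String :=
  (if started then ss.takeWhile (fun s => !pvHist s)
   else (ss.takeWhile (fun s => !pvHist s)).dropWhile (fun s => !pvOnu s)).filter pvKeep

lemma pvLoopA_eq (lines : List String) : ∀ (acc : List String) (started : Bool),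
    pvLoopA lines acc started = acc ++ pvTail (lines.map PySem.Str.strip) started := by
  induction lines with
  | nil => intro acc started; cases started <;> simp [pvLoopA, pvTail]
  | cons l rest ih =>
    intro acc started
    simp only [pvLoopA, List.map_cons]
    by_cases hA : PySem.Str.isIn "Authpass Time" (PySem.Str.strip l) = true <;>
    by_cases hO : PySem.Str.isIn "OfflineTime" (PySem.Str.strip l) = true <;>
    by_cases hU : PySem.Str.isIn "ONU interface:" (PySem.Str.strip l) = true <;>
    by_cases hK : pvKeep (PySem.Str.strip l) = true <;>
    cases started <;>
    simp_all [pvTail, pvHist, pvOnu, pvKeep, List.takeWhile_cons, List.dropWhile_cons,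
      List.filter_cons, ih]

lemma getD_map_succ (o : Option Nat) (m : Nat) :
    (o.map (· + 1)).getD (m + 1) = o.getD m + 1 := by cases o <;> rfl

-- takeWhile (!p) is take up to the first p-index
lemma takeWhile_eq_take (p : String → Bool) (ss : List String) :
    ss.takeWhile (fun s => !p s) = ss.take ((ss.findIdx? p).getD ss.length) := by
  induction ss with
  | nil => rfl
  | cons a l ih =>
    by_cases h : p a = true
    · simp [List.takeWhile_cons, List.findIdx?_cons, h]
    · simp only [List.takeWhile_cons, List.findIdx?_cons, h, List.length_cons,
        cond_false, Bool.not_false, if_pos rfl, getD_map_succ, List.take_succ_cons]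
      simp [h, ih]

-- the key correspondence: A's takeWhile/dropWhile shape = B's take/drop by boundary indices
lemma key (ss : List String) :
    (ss.takeWhile (fun s => !pvHist s)).dropWhile (fun s => !pvOnu s)
      = (ss.take (pvStop ss)).drop (pvStart ss) := by
  induction ss with
  | nil => rfl
  | cons a l ih =>
    by_cases hH : pvHist a = true
    · simp [List.takeWhile_cons, pvStop, pvStart, List.findIdx?_cons, hH]
    · by_cases hO : pvOnu a = true
      · simp [List.takeWhile_cons, List.dropWhile_cons, hH, hO, pvStop, pvStart,
          List.findIdx?_cons, getD_map_succ, takeWhile_eq_take]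
      · simp only [List.takeWhile_cons, List.dropWhile_cons, hH, hO, pvStop, pvStart,
          List.findIdx?_cons, List.length_cons, Bool.not_false, Bool.not_true,
          cond_false, getD_map_succ, List.take_succ_cons, List.drop_succ_cons,
          if_true, Bool.false_eq_true, if_false, reduceIte]
        exact ih

-- ===== VERDICT (by name: the statement is the Claim_ definition above) =====
theorem parsear_info_basica_zte_py_spec : Claim_equal_parsear_info_basica_zte_py := by
  intro output _
  show _ = _
  rw [parsear_info_basica_zte_py, pvLoopA_eq]
  show PySem.Str.join "\n" _ = _
  rw [parsear_info_basica_zte_py_alt]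
  simp only [pvTail, Bool.false_eq_true, if_false, key]
  rfl
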